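-- pv_equiv track=rewrite | github.com/McfearJnr/BuildLogic-Panel-Tool-main | BuildLogic Panel Suite.py | decompress_grid
-- ===== SOURCE A (Python) =====
-- GRID_SIZE = 16
--
-- def decompress_grid(rle_data):
--     """Decompresses RLE data back into the standard grid format."""
--     new_grid = [[{'char': ' ', 'color': 'black'} for _ in range(GRID_SIZE)] for _ in range(GRID_SIZE)]
--
--     # Reconstruct the flat list
--     flat_cells = []
--     for run in rle_data:
--         count, char, color = run
--         for _ in range(count):
--             flat_cells.append({'char': char, 'color': color})
--
--     # Fill the 2D grid safely
--     idx = 0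
--     total_cells = GRID_SIZE * GRID_SIZE
--     for r in range(GRID_SIZE):
--         for c in range(GRID_SIZE):
--             if idx < len(flat_cells):
--                 new_grid[r][c] = flat_cells[idx]
--                 idx += 1
--
--     return new_grid
-- ===== SOURCE B (Python) =====
-- GRID_SIZE = 16
--
-- def decompress_grid(rle_data):
--     """Decompresses RLE data back into the standard grid format."""
--     total = GRID_SIZE * GRID_SIZE
--     flat = []
--     for count, char, color in rle_data:
--         if len(flat) >= total:
--             break
--         flat.extend({'char': char, 'color': color} for _ in range(min(count, total - len(flat))))
--     flat.extend({'char': ' ', 'color': 'black'} for _ in range(total - len(flat)))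
--     return [flat[r * GRID_SIZE:(r + 1) * GRID_SIZE] for r in range(GRID_SIZE)]
-- ===== Notes on version B (the rewrite author's own statement) =====
-- stated objective: faster
-- what changed: B builds one flat cell list capped at 256 entries (stopping once the grid is full), pads it to exactly 256 default cells, and slices it into 16 rows, instead of A's full run expansion into an unbounded flat list followed by a guarded cell-by-cell overwrite of a pre-filled 16x16 grid.
import Mathlib
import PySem

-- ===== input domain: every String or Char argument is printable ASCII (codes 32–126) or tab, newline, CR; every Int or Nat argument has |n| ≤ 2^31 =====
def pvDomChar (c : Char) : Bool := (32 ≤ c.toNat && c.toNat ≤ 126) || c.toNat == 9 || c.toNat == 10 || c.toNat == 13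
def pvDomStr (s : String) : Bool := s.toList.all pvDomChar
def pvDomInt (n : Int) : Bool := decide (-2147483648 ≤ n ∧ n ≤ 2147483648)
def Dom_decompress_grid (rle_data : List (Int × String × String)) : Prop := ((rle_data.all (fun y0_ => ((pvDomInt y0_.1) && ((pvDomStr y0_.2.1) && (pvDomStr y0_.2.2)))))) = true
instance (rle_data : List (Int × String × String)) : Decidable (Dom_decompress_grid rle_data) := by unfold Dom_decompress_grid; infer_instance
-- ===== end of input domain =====

-- B replaces A's pre-filled 16x16 grid and guarded overwrite loop by building one flat
-- list capped at 256 cells, padding it with default cells, and slicing it into 16 rows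
-- (objective: simpler decomposition; B also stops expanding runs once 256 cells exist).

-- ===== PORT A =====
-- a dict {'char': x, 'color': y} is the association list [("char", x), ("color", y)]
def decompress_grid (rle_data : List (Int × String × String)) : List (List (List (String × String))) :=
  -- new_grid = [[{'char':' ','color':'black'} for _ in range(16)] for _ in range(16)]
  let new_grid : List (List (List (String × String))) :=
    (List.range 16).map (fun _ => (List.range 16).map (fun _ => [("char", " "), ("color", "black")]))
  -- for run in rle_data: count, char, color = run; for _ in range(count): flat_cells.append({...})
  -- (list.append is O(1) in Python; encoded as cons onto the accumulator, reversed once at the end)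
  let flat_cells : List (List (String × String)) :=
    (rle_data.foldl (fun acc run =>
      (PySem.List.pyRange 0 run.1 1).foldl
        (fun a _ => [("char", run.2.1), ("color", run.2.2)] :: a) acc) []).reverse
  -- idx = 0; for r in range(16): for c in range(16): if idx < len(flat_cells): new_grid[r][c] = flat_cells[idx]; idx += 1
  -- (flat_cells[idx] is getD idx []: the guard idx < len makes this exact)
  let st :=
    (List.range 16).foldl (fun (st : List (List (List (String × String))) × Nat) r =>
      (List.range 16).foldl (fun st c =>
        if st.2 < flat_cells.length then
          (st.1.set r ((st.1.getD r []).set c (flat_cells.getD st.2 [])), st.2 + 1)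
        else st) st) (new_grid, 0)
  st.1

-- ===== PORT B =====
-- the default cell {'char': ' ', 'color': 'black'}
def pvDefaultCell : List (String × String) := [("char", " "), ("color", "black")]

-- B's loop with break: it stops as soon as 256 cells exist; each extend adds
-- min(count, 256 - len) copies (a generator over range(n) of a constant cell is
-- List.replicate n.toNat of it — range of a negative n is empty — so this is exact)
def pvFlatB : List (Int × String × String) → List (List (String × String)) → List (List (String × String))
  | [], acc => acc
  | run :: rest, acc =>
    if 256 ≤ acc.length then acc
    else pvFlatB rest (acc ++ List.replicate (min run.1 (256 - (acc.length : Int))).toNat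
                              [("char", run.2.1), ("color", run.2.2)])

def decompress_grid_alt (rle_data : List (Int × String × String)) : List (List (List (String × String))) :=
  let flat := pvFlatB rle_data []
  -- flat.extend(default cell for _ in range(256 - len(flat)))  (len(flat) ≤ 256 after the loop)
  let flat := flat ++ List.replicate (256 - flat.length) pvDefaultCell
  -- [flat[r*16:(r+1)*16] for r in range(16)]: a slice with nonneg in-range bounds is drop/take, exact
  (List.range 16).map (fun r => (flat.drop (r * 16)).take 16)

-- ===== PRECONDITION & SPEC =====
def Spec_decompress_grid (rle_data : List (Int × String × String)) (out : List (List (List (String × String)))) : Prop := out = decompress_grid_alt rle_data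
instance (rle_data : List (Int × String × String)) (out : List (List (List (String × String)))) : Decidable (Spec_decompress_grid rle_data out) := by unfold Spec_decompress_grid; infer_instance

-- ===== CLAIM (what is proved, stated in full; the proofs are below) =====
def Claim_equal_decompress_grid : Prop := ∀ (rle_data : List (Int × String × String)), Dom_decompress_grid rle_data → Spec_decompress_grid rle_data (decompress_grid rle_data)

-- ===== LEMMAS AND PROOFS =====
theorem pv_take_min_cap {α : Type} (acc X : List α) (c : α) (n : Nat) (h : acc.length < 256) :
    (acc ++ (List.replicate (min n (256 - acc.length)) c ++ X)).take 256
      = (acc ++ (List.replicate n c ++ X)).take 256 := by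
  simp only [List.take_append, List.take_replicate, List.length_replicate]
  have e1 : min (256 - acc.length) (min n (256 - acc.length)) = min (256 - acc.length) n := by omega
  have e2 : 256 - acc.length - min n (256 - acc.length) = 256 - acc.length - n := by omega
  rw [e1, e2]


theorem pv_foldl_cons_const {α β : Type} (c : α) :
    ∀ (l : List β) (acc : List α), l.foldl (fun a _ => c :: a) acc = List.replicate l.length c ++ acc := by
  intro l
  induction l with
  | nil => simp
  | cons x xs ih =>
    intro acc
    rw [List.foldl_cons, ih, List.length_cons, List.replicate_succ']
    simp

def pvBigFlat (rle_data : List (Int × String × String)) : List (List (String × String)) :=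
  rle_data.flatMap (fun run => List.replicate run.1.toNat [("char", run.2.1), ("color", run.2.2)])

theorem pv_flatA_gen (rle_data : List (Int × String × String)) :
    ∀ acc, rle_data.foldl (fun acc run =>
      (PySem.List.pyRange 0 run.1 1).foldl
        (fun a _ => [("char", run.2.1), ("color", run.2.2)] :: a) acc) acc
      = (pvBigFlat rle_data).reverse ++ acc := by
  induction rle_data with
  | nil => simp [pvBigFlat]
  | cons run rest ih =>
    intro acc
    rw [List.foldl_cons, pv_foldl_cons_const, ih, PySem.List.length_pyRange_one]
    simp [pvBigFlat, List.flatMap_cons]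

theorem pv_flatB_gen : ∀ (rle_data : List (Int × String × String)) (acc : List (List (String × String))),
    acc.length ≤ 256 → pvFlatB rle_data acc = (acc ++ pvBigFlat rle_data).take 256 := by
  intro rle
  induction rle with
  | nil =>
    intro acc h
    simp [pvFlatB, pvBigFlat, List.take_of_length_le h]
  | cons run rest ih =>
    intro acc h
    by_cases hfull : 256 ≤ acc.length
    · have hlen : acc.length = 256 := le_antisymm h hfull
      rw [pvFlatB, if_pos hfull, List.take_append, hlen]
      simp [List.take_of_length_le (le_of_eq hlen)]
    · have hlt : acc.length < 256 := by omega
      have hmin : (min run.1 (256 - (acc.length : Int))).toNat = min run.1.toNat (256 - acc.length) := by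
        omega
      rw [pvFlatB, if_neg (by omega), hmin]
      rw [ih _ (by simp; omega)]
      simp only [pvBigFlat, List.flatMap_cons, List.append_assoc]
      exact pv_take_min_cap acc _ _ _ hlt

-- getD helpers
theorem pv_getD_set_self {α : Type} (l : List α) (i : Nat) (a d : α) (h : i < l.length) :
    (l.set i a).getD i d = a := by
  simp [List.getD_eq_getElem?_getD, h]

theorem pv_getD_set_ne {α : Type} (l : List α) (i j : Nat) (a d : α) (h : i ≠ j) :
    (l.set i a).getD j d = l.getD j d := by
  simp [List.getD_eq_getElem?_getD, List.getElem?_set_ne h]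

theorem pv_set_getD_self {α : Type} (l : List α) (i : Nat) (d : α) (h : i < l.length) :
    l.set i (l.getD i d) = l := by
  have : l.getD i d = l[i] := by simp [List.getD_eq_getElem?_getD, List.getElem?_eq_getElem h]
  rw [this, List.set_getElem_self]

-- the row segment A's inner loop writes
def pvWriteSeg (flat row : List (List (String × String))) (i0 : Nat) : Nat → List (List (String × String))
  | 0 => row
  | n + 1 =>
    if i0 + n < flat.length then (pvWriteSeg flat row i0 n).set n (flat.getD (i0 + n) [])
    else pvWriteSeg flat row i0 n

theorem pv_writeSeg_length (flat row : List (List (String × String))) (i0 : Nat) :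
    ∀ n, (pvWriteSeg flat row i0 n).length = row.length := by
  intro n
  induction n with
  | zero => rfl
  | succ n ih => simp [pvWriteSeg]; split <;> simp [ih]

theorem pv_writeSeg_getD_ge (flat row : List (List (String × String))) (i0 : Nat) :
    ∀ n c, n ≤ c → (pvWriteSeg flat row i0 n).getD c [] = row.getD c [] := by
  intro n
  induction n with
  | zero => intro c _; rfl
  | succ n ih =>
    intro c hc
    rw [pvWriteSeg]
    split
    · rw [pv_getD_set_ne _ _ _ _ _ (by omega), ih c (by omega)]
    · exact ih c (by omega)

theorem pv_writeSeg_getD_lt (flat row : List (List (String × String))) (i0 : Nat) :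
    ∀ n c, c < n → c < row.length →
      (pvWriteSeg flat row i0 n).getD c []
        = if i0 + c < flat.length then flat.getD (i0 + c) [] else row.getD c [] := by
  intro n
  induction n with
  | zero => intro c hc; omega
  | succ n ih =>
    intro c hc hrow
    rw [pvWriteSeg]
    by_cases hcn : c = n
    · subst hcn
      split
      · rw [pv_getD_set_self _ _ _ _ (by rw [pv_writeSeg_length]; exact hrow)]
      · rw [pv_writeSeg_getD_ge _ _ _ _ _ (le_refl c)]
    · have hlt : c < n := by omega
      split
      · rw [pv_getD_set_ne _ _ _ _ _ (by omega), ih c hlt hrow]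
      · exact ih c hlt hrow

-- A's inner loop (one row) in terms of pvWriteSeg
theorem pv_inner (flat : List (List (String × String))) (r : Nat) :
    ∀ (n : Nat) (g : List (List (List (String × String)))) (row : List (List (String × String))) (i0 : Nat),
      r < g.length → i0 ≤ flat.length →
      (List.range n).foldl (fun st c =>
          if st.2 < flat.length then
            (st.1.set r ((st.1.getD r []).set c (flat.getD st.2 [])), st.2 + 1)
          else st) (g.set r row, i0)
        = (g.set r (pvWriteSeg flat row i0 n), min (i0 + n) flat.length) := by
  intro n
  induction n with
  | zero =>
    intro g row i0 hr hi
    simp [pvWriteSeg]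
    omega
  | succ n ih =>
    intro g row i0 hr hi
    rw [List.range_succ, List.foldl_append, ih g row i0 hr hi]
    simp only [List.foldl_cons, List.foldl_nil]
    by_cases hcond : i0 + n < flat.length
    · have hmin : min (i0 + n) flat.length = i0 + n := by omega
      rw [hmin, if_pos hcond]
      rw [pv_getD_set_self _ _ _ _ (by omega), List.set_set]
      rw [pvWriteSeg, if_pos hcond]
      congr 1
      omega
    · have hmin : min (i0 + n) flat.length = flat.length := by omega
      rw [hmin, if_neg (by omega)]
      rw [pvWriteSeg, if_neg hcond]
      congr 1
      omega

-- the grid after the first m rows of A's outer loop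
def pvGridAfter (flat : List (List (String × String))) (g0 : List (List (List (String × String)))) :
    Nat → List (List (List (String × String)))
  | 0 => g0
  | m + 1 =>
    (pvGridAfter flat g0 m).set m
      (pvWriteSeg flat ((pvGridAfter flat g0 m).getD m []) (min (m * 16) flat.length) 16)

theorem pv_gridAfter_length (flat : List (List (String × String)))
    (g0 : List (List (List (String × String)))) :
    ∀ m, (pvGridAfter flat g0 m).length = g0.length := by
  intro m
  induction m with
  | zero => rfl
  | succ m ih => simp [pvGridAfter, ih]

theorem pv_outer (flat : List (List (String × String)))
    (g0 : List (List (List (String × String)))) (hg : g0.length = 16) :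
    ∀ M, M ≤ 16 →
      (List.range M).foldl (fun st r =>
          (List.range 16).foldl (fun st c =>
            if st.2 < flat.length then
              (st.1.set r ((st.1.getD r []).set c (flat.getD st.2 [])), st.2 + 1)
            else st) st) (g0, 0)
        = (pvGridAfter flat g0 M, min (M * 16) flat.length) := by
  intro M
  induction M with
  | zero => simp [pvGridAfter]
  | succ M ih =>
    intro hM
    rw [show List.range (M+1) = List.range M ++ [M] from List.range_succ, List.foldl_append, ih (by omega)]
    simp only [List.foldl_cons, List.foldl_nil]
    have hlen : (pvGridAfter flat g0 M).length = 16 := by rw [pv_gridAfter_length, hg]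
    have hM' : M < (pvGridAfter flat g0 M).length := by omega
    conv_lhs => rw [← pv_set_getD_self (pvGridAfter flat g0 M) M [] hM']
    rw [pv_inner flat M 16 _ _ _ (by simpa using hM') (by omega)]
    rw [pvGridAfter]
    congr 1
    omega

theorem pv_gridAfter_getD_ge (flat : List (List (String × String)))
    (g0 : List (List (List (String × String)))) :
    ∀ m r, m ≤ r → (pvGridAfter flat g0 m).getD r [] = g0.getD r [] := by
  intro m
  induction m with
  | zero => intro r _; rfl
  | succ m ih =>
    intro r h
    rw [pvGridAfter, pv_getD_set_ne _ _ _ _ _ (by omega), ih r (by omega)]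

theorem pv_gridAfter_getD_lt (flat : List (List (String × String)))
    (g0 : List (List (List (String × String)))) :
    ∀ m r, r < m → m ≤ g0.length →
      (pvGridAfter flat g0 m).getD r []
        = pvWriteSeg flat (g0.getD r []) (min (r * 16) flat.length) 16 := by
  intro m
  induction m with
  | zero => intro r h; omega
  | succ m ih =>
    intro r h hm
    by_cases hrm : r = m
    · subst hrm
      rw [pvGridAfter, pv_getD_set_self _ _ _ _ (by rw [pv_gridAfter_length]; omega),
        pv_gridAfter_getD_ge flat g0 r r (le_refl r)]
    · rw [pvGridAfter, pv_getD_set_ne _ _ _ _ _ (by omega), ih r (by omega) (by omega)]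

set_option maxHeartbeats 2000000 in
theorem pv_main (rle_data : List (Int × String × String)) :
    decompress_grid rle_data = decompress_grid_alt rle_data := by
  unfold decompress_grid decompress_grid_alt
  rw [pv_flatA_gen rle_data [], pv_flatB_gen rle_data [] (by simp)]
  simp only [List.append_nil, List.nil_append, List.reverse_reverse]
  set flat := pvBigFlat rle_data with hflat
  set G0 : List (List (List (String × String))) :=
    (List.range 16).map (fun _ => (List.range 16).map (fun _ => [("char", " "), ("color", "black")])) with hG0
  have hG0len : G0.length = 16 := by simp [hG0]
  rw [pv_outer flat G0 hG0len 16 (le_refl 16)]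
  set padded := flat.take 256 ++ List.replicate (256 - (flat.take 256).length) pvDefaultCell with hpad
  have htk : (flat.take 256).length = min 256 flat.length := List.length_take
  have hpadlen : padded.length = 256 := by
    rw [hpad, List.length_append, List.length_replicate, htk]
    omega
  have hrow0 : ∀ r, r < 16 → G0.getD r []
      = (List.range 16).map (fun _ => ([("char", " "), ("color", "black")] : List (String × String))) := by
    intro r hr
    rw [hG0, List.getD_eq_getElem?_getD, List.getElem?_map, List.getElem?_range hr]
    rfl
  apply List.ext_getElem
  · simp [pv_gridAfter_length, hG0len]
  · intro r h1 h2
    have hr : r < 16 := by simpa [pv_gridAfter_length, hG0len] using h1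
    have hrowlen : (G0.getD r []).length = 16 := by rw [hrow0 r hr]; simp
    rw [List.getElem_map]
    rw [show (pvGridAfter flat G0 16, min (16 * 16) flat.length).1[r]'h1
          = (pvGridAfter flat G0 16).getD r [] from
      (List.getD_eq_getElem _ _ (by rw [pv_gridAfter_length, hG0len]; exact hr)).symm]
    rw [pv_gridAfter_getD_lt flat G0 16 r hr (by omega)]
    have hrc : (List.range 16)[r]'(by simpa using hr) = r := List.getElem_range _
    apply List.ext_getElem
    · rw [pv_writeSeg_length, hrowlen, List.length_take, List.length_drop, hrc, hpadlen]
      omega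
    · intro c hc1 hc2
      have hc : c < 16 := by rwa [pv_writeSeg_length, hrowlen] at hc1
      rw [show (pvWriteSeg flat (G0.getD r []) (min (r*16) flat.length) 16)[c]'hc1
            = (pvWriteSeg flat (G0.getD r []) (min (r*16) flat.length) 16).getD c [] from
        (List.getD_eq_getElem _ _ hc1).symm]
      rw [pv_writeSeg_getD_lt flat _ _ 16 c hc (by omega)]
      rw [List.getElem_take, List.getElem_drop]
      simp only [hrc]
      have hi256 : r * 16 + c < 256 := by omega
      by_cases hiflat : r * 16 + c < flat.length
      · have hmin : min (r * 16) flat.length = r * 16 := by omega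
        rw [hmin, if_pos (show r * 16 + c < flat.length from hiflat)]
        rw [← List.getD_eq_getElem padded [] (by rw [hpadlen]; omega), hpad]
        rw [List.getD_append _ _ _ _ (by rw [htk]; omega)]
        have h1' : (List.take 256 flat).getD (r*16+c) [] = flat.getD (r*16+c) [] := by
          rw [List.getD_eq_getElem _ _ (by rw [htk]; omega), List.getElem_take,
            List.getD_eq_getElem _ _ hiflat]
        rw [h1']
      · have hcond : ¬ (min (r * 16) flat.length + c < flat.length) := by omega
        rw [if_neg hcond, hrow0 r hr]
        rw [← List.getD_eq_getElem padded [] (by rw [hpadlen]; omega), hpad]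
        rw [List.getD_append_right _ _ _ _ (by rw [htk]; omega)]
        have h2' : (List.replicate (256 - (List.take 256 flat).length) pvDefaultCell).getD
            (r*16+c - (List.take 256 flat).length) [] = pvDefaultCell := by
          rw [List.getD_eq_getElem _ _ (by simp only [List.length_replicate, htk]; omega),
            List.getElem_replicate]
        rw [h2']
        rw [List.getD_eq_getElem?_getD, List.getElem?_map, List.getElem?_range hc]
        rfl

-- ===== VERDICT (by name: the statement is the Claim_ definition above) =====
theorem decompress_grid_spec : Claim_equal_decompress_grid := by
  intro rle_data _
  unfold Spec_decompress_grid
  exact pv_main rle_data
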